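-- pv_equiv track=rewrite | github.com/Tomgfl/Cours-Lycee | NSI/Terminal/EP TEST 2/EP9 ex2.py | trouver_intrus
-- ===== SOURCE A (Python) =====
-- def trouver_intrus(tab,g,d):
--     if g == d:
--         return tab[g]
--
--     else:
--         nombre_de_triplet = (d - g)//3
--         indice = g+3*(nombre_de_triplet//2)
--
--         if tab[indice] == tab[indice+1]:
--             return trouver_intrus(tab,indice+3,d)
--         else:
--             return trouver_intrus(tab,g,indice)
-- ===== SOURCE B (Python) =====
-- def trouver_intrus(tab, g, d):
--     n = (d - g) // 3          # number of remaining triplets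
--     while n > 0:
--         m = n // 2
--         i = g + 3 * m
--         if tab[i] == tab[i + 1]:
--             g = i + 3
--             n = n - m - 1
--         else:
--             n = m
--     return tab[g]
-- ===== Notes on version B (the rewrite author's own statement) =====
-- stated objective: alternative
-- what changed: B replaces A's tail recursion on the pair of bounds (g,d) by an iterative loop over a single remaining-triplet counter n=(d-g)//3, halving n each step and only keeping the left bound g; the right bound d disappears from the loop state.
-- outside the precondition, e.g. on trouver_intrus([1, 1, 2, 3, 4], 0, 4): A returns 3, B returns 3
import Mathlib
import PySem

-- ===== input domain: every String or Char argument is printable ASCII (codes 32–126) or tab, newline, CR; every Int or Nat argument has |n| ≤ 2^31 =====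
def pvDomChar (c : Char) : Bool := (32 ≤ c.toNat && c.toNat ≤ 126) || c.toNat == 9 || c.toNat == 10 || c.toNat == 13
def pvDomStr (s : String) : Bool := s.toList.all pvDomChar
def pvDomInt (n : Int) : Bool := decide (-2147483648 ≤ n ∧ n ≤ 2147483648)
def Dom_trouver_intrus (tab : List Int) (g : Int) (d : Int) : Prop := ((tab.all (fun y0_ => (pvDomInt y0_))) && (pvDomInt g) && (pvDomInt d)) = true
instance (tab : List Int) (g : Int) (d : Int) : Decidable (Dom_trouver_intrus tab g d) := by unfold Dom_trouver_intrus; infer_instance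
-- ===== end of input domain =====

-- B replaces A's tail recursion on the bounds (g, d) by an iterative loop over a single
-- remaining-triplet counter (alternative decomposition; same cost).

-- ===== PORT A =====
-- A's recursion need not terminate for arbitrary (g, d) (Python then raises RecursionError),
-- so the port carries a fuel argument; the fuel (d-g).toNat+1 is proved sufficient on Pre_.
def trouver_intrus_go (tab : List Int) (fuel : Nat) (g : Int) (d : Int) : Int :=
  match fuel with
  | 0 => 0  -- fuel exhausted: unreached on Pre_ (Python: RecursionError)
  | fuel + 1 =>
    if g = d then
      (PySem.List.pyGet? tab g).getD 0  -- none = IndexError, excluded by Pre_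
    else
      let nombre_de_triplet := PySem.Int.floordiv (d - g) 3
      let indice := g + 3 * PySem.Int.floordiv nombre_de_triplet 2
      if (PySem.List.pyGet? tab indice).getD 0 = (PySem.List.pyGet? tab (indice + 1)).getD 0 then
        trouver_intrus_go tab fuel (indice + 3) d
      else
        trouver_intrus_go tab fuel g indice

def trouver_intrus (tab : List Int) (g : Int) (d : Int) : Int :=
  trouver_intrus_go tab ((d - g).toNat + 1) g d

-- ===== PORT B =====
-- the while loop: the state is the left bound g together with the triplet counter n;
-- n strictly decreases while positive, so the loop is total (measure n.toNat, no fuel).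
def trouver_intrus_alt_go (tab : List Int) (g : Int) (n : Int) : Int :=
  if 0 < n then
    let m := PySem.Int.floordiv n 2
    let i := g + 3 * m
    if (PySem.List.pyGet? tab i).getD 0 = (PySem.List.pyGet? tab (i + 1)).getD 0 then
      trouver_intrus_alt_go tab (i + 3) (n - m - 1)
    else
      trouver_intrus_alt_go tab g m
  else
    (PySem.List.pyGet? tab g).getD 0
termination_by n.toNat
decreasing_by
  all_goals
    have h2 : PySem.Int.floordiv n 2 = n / 2 := PySem.Int.floordiv_eq_ediv_of_pos (by omega)
    simp only [h2] at *
    omega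

def trouver_intrus_alt (tab : List Int) (g : Int) (d : Int) : Int :=
  trouver_intrus_alt_go tab g (PySem.Int.floordiv (d - g) 3)

-- ===== PRECONDITION & SPEC =====
-- Pre_ excludes exactly the calls on which A raises: an index outside [-len, len)
-- (IndexError) or an unbounded recursion (RecursionError, always reached when g > d and
-- reached for 3 ∤ (d - g) when the shrinking search hits an adjacent duplicate). It admits
-- the well-formed in-range bounds with 3 ∣ (d - g), and in addition any bounds g ≤ d whose
-- comparison window [g, first midpoint + 1] lies in index range and holds no two adjacent
-- equal entries (there every comparison is False, the right bound only shrinks, and A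
-- returns tab[g]). On remaining ill-formed calls where A happens to return anyway, B
-- returns the same value (see the cite in the claim), but nothing is claimed there.
def Pre_trouver_intrus (tab : List Int) (g : Int) (d : Int) : Prop :=
  (-(tab.length : Int) ≤ g ∧ g ≤ d ∧ d < tab.length ∧ (3 : Int) ∣ (d - g)) ∨
  (-(tab.length : Int) ≤ g ∧ g < tab.length ∧ g ≤ d ∧
    (g < d → (g + 3 * ((d - g) / 3 / 2) + 1 < tab.length ∧
      ∀ k < (3 * ((d - g) / 3 / 2) + 1).toNat,
        (PySem.List.pyGet? tab (g + k)).getD 0 ≠ (PySem.List.pyGet? tab (g + k + 1)).getD 0)))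
instance (tab : List Int) (g : Int) (d : Int) : Decidable (Pre_trouver_intrus tab g d) := by
  unfold Pre_trouver_intrus; infer_instance

def pvWitness_trouver_intrus : List Int × Int × Int := ([1, 1, 4, 2, 2, 3, 3], 0, 6)

def Spec_trouver_intrus (tab : List Int) (g : Int) (d : Int) (out : Int) : Prop := out = trouver_intrus_alt tab g d
instance (tab : List Int) (g : Int) (d : Int) (out : Int) : Decidable (Spec_trouver_intrus tab g d out) := by unfold Spec_trouver_intrus; infer_instance

-- ===== CLAIM (what is proved, stated in full; the proofs are below) =====
def Claim_equal_trouver_intrus : Prop := ∀ (tab : List Int) (g : Int) (d : Int), Dom_trouver_intrus tab g d → Pre_trouver_intrus tab g d → Spec_trouver_intrus tab g d (trouver_intrus tab g d)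

-- ===== LEMMAS AND PROOFS =====

-- Main invariant: with d = g + 3n (n ≥ 0) and enough fuel, A's recursion on (g, d)
-- computes exactly B's loop on (g, n).
theorem go_eq_alt_go (tab : List Int) :
    ∀ (fuel : Nat) (g d n : Int), 0 ≤ n → d = g + 3 * n → (d - g).toNat < fuel →
      trouver_intrus_go tab fuel g d = trouver_intrus_alt_go tab g n := by
  intro fuel
  induction fuel with
  | zero => intro g d n _ _ h; omega
  | succ fuel ih =>
    intro g d n hn hd hfuel
    by_cases hgd : g = d
    · have hn0 : n = 0 := by omega
      rw [trouver_intrus_alt_go]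
      simp [trouver_intrus_go, hgd, hn0]
    · have hpos : 0 < n := by omega
      have hfd : PySem.Int.floordiv (d - g) 3 = n := by
        rw [PySem.Int.floordiv_eq_ediv_of_pos (by omega)]; omega
      have h2 : PySem.Int.floordiv n 2 = n / 2 := PySem.Int.floordiv_eq_ediv_of_pos (by omega)
      set m := n / 2 with hm
      have hm2 : 2 * m ≤ n ∧ n ≤ 2 * m + 1 := by omega
      rw [trouver_intrus_alt_go]
      simp only [trouver_intrus_go, if_neg hgd, if_pos hpos, hfd, h2]
      set indice := g + 3 * m with hi
      by_cases hb : (PySem.List.pyGet? tab indice).getD 0 = (PySem.List.pyGet? tab (indice + 1)).getD 0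
      · rw [if_pos hb, if_pos hb]
        exact ih (indice + 3) d (n - m - 1) (by omega) (by omega) (by omega)
      · rw [if_neg hb, if_neg hb]
        exact ih g indice m (by omega) (by omega) (by omega)

-- the window disjunct: every comparison in the window [g, hi] is False, so the right
-- bound only shrinks and both programs end at tab[g]
theorem go_window (tab : List Int) (g hi : Int)
    (H : ∀ i : Int, g ≤ i → i ≤ hi →
      (PySem.List.pyGet? tab i).getD 0 ≠ (PySem.List.pyGet? tab (i + 1)).getD 0) :
    ∀ (fuel : Nat) (d : Int), g ≤ d → (g < d → g + 3 * ((d - g) / 3 / 2) ≤ hi) →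
      (d - g).toNat < fuel →
      trouver_intrus_go tab fuel g d = (PySem.List.pyGet? tab g).getD 0 := by
  intro fuel
  induction fuel with
  | zero => intro d _ _ hf; omega
  | succ fuel ih =>
    intro d hle hmid hf
    by_cases hgd : g = d
    · simp [trouver_intrus_go, hgd]
    · have hn : PySem.Int.floordiv (d - g) 3 = (d - g) / 3 :=
        PySem.Int.floordiv_eq_ediv_of_pos (by omega)
      have hm : PySem.Int.floordiv ((d - g) / 3) 2 = (d - g) / 3 / 2 :=
        PySem.Int.floordiv_eq_ediv_of_pos (by omega)
      simp only [trouver_intrus_go, if_neg hgd, hn, hm]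
      set m := (d - g) / 3 / 2 with hmdef
      have hb : 0 ≤ m ∧ g + 3 * m + 1 ≤ d := by
        have h3 : 3 * ((d - g) / 3) ≤ d - g ∧ d - g < 3 * ((d - g) / 3) + 3 := by omega
        omega
      rw [if_neg (H (g + 3 * m) (by omega) (by omega : g + 3 * m ≤ hi))]
      refine ih (g + 3 * m) (by omega) ?_ (by omega)
      intro hlt
      have h3 : 3 * ((g + 3 * m - g) / 3) ≤ g + 3 * m - g := by omega
      have := hmid (by omega)
      omega

theorem alt_go_window (tab : List Int) (g hi : Int)
    (H : ∀ i : Int, g ≤ i → i ≤ hi →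
      (PySem.List.pyGet? tab i).getD 0 ≠ (PySem.List.pyGet? tab (i + 1)).getD 0) :
    ∀ (k : Nat) (n : Int), n.toNat ≤ k → (0 < n → g + 3 * (n / 2) ≤ hi) →
      trouver_intrus_alt_go tab g n = (PySem.List.pyGet? tab g).getD 0 := by
  intro k
  induction k with
  | zero =>
    intro n hk _
    rw [trouver_intrus_alt_go, if_neg (by omega)]
  | succ k ih =>
    intro n hk hmid
    by_cases hpos : 0 < n
    · have hm : PySem.Int.floordiv n 2 = n / 2 :=
        PySem.Int.floordiv_eq_ediv_of_pos (by omega)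
      rw [trouver_intrus_alt_go, if_pos hpos]
      simp only [hm]
      rw [if_neg (H (g + 3 * (n / 2)) (by omega) (hmid hpos))]
      refine ih (n / 2) (by omega) ?_
      intro h2
      have := hmid hpos
      omega
    · rw [trouver_intrus_alt_go, if_neg hpos]

-- ===== VERDICT (by name: the statement is the Claim_ definition above) =====
theorem trouver_intrus_spec : Claim_equal_trouver_intrus := by
  intro tab g d _ hpre
  unfold Spec_trouver_intrus trouver_intrus trouver_intrus_alt
  rcases hpre with ⟨_, hle, _, k, hk⟩ | ⟨_, _, hle, hwin⟩
  · have hfd : PySem.Int.floordiv (d - g) 3 = k := by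
      rw [PySem.Int.floordiv_eq_ediv_of_pos (by omega)]; omega
    rw [hfd]
    exact go_eq_alt_go tab _ g d k (by omega) (by omega) (by omega)
  · by_cases hgd : g = d
    · subst hgd
      have hfd : PySem.Int.floordiv (g - g) 3 = 0 := by
        rw [PySem.Int.floordiv_eq_ediv_of_pos (by omega)]; omega
      rw [hfd, trouver_intrus_alt_go, if_neg (by omega)]
      simp [trouver_intrus_go]
    · obtain ⟨_, hH⟩ := hwin (by omega)
      have H : ∀ i : Int, g ≤ i → i ≤ g + 3 * ((d - g) / 3 / 2) →
          (PySem.List.pyGet? tab i).getD 0 ≠ (PySem.List.pyGet? tab (i + 1)).getD 0 := by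
        intro i h1 h2
        have hcast : (((i - g).toNat : Int)) = i - g := by omega
        have := hH (i - g).toNat (by omega)
        rw [hcast] at this
        simpa [show g + (i - g) = i by ring, show g + (i - g) + 1 = i + 1 by ring] using this
      have hfd : PySem.Int.floordiv (d - g) 3 = (d - g) / 3 :=
        PySem.Int.floordiv_eq_ediv_of_pos (by omega)
      rw [hfd]
      rw [go_window tab g (g + 3 * ((d - g) / 3 / 2)) H _ d hle (fun _ => le_refl _) (by omega)]
      have h3 : 0 ≤ (d - g) / 3 := by omega
      rw [alt_go_window tab g (g + 3 * ((d - g) / 3 / 2)) H ((d - g) / 3).toNat _ (by omega)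
        (fun _ => by omega)]
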